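-- pv_equiv track=rewrite | github.com/proishan11/Quine-Mc-CluskeyMethod | tabulation.py | get_minimal_implicants
-- ===== SOURCE A (Python) =====
-- def counter(list):
-- 	count =0
-- 	for string in [x[0] for x in list]:
-- 		for i in string:
-- 			if i=='0' or i=='1':
-- 				count+=1
--
-- 	return count
--
-- def get_minimal_implicants(selected_primeImplicants):
-- 	minimal_implicants=[]
-- 	minimum=999999
-- 	for i in selected_primeImplicants:
-- 		if counter(i)<minimum:
-- 			minimum=counter(i)
--
-- 	for i in selected_primeImplicants:
-- 		if counter(i)==minimum:
-- 			minimal_implicants.append(i)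
--
-- 	return minimal_implicants
-- ===== SOURCE B (Python) =====
-- def counter(list):
-- 	count =0
-- 	for string in [x[0] for x in list]:
-- 		for i in string:
-- 			if i=='0' or i=='1':
-- 				count+=1
--
-- 	return count
--
-- def get_minimal_implicants(selected_primeImplicants):
-- 	minimal_implicants = []
-- 	minimum = 999999
-- 	for i in selected_primeImplicants:
-- 		c = counter(i)
-- 		if c < minimum:
-- 			minimum = c
-- 			minimal_implicants = [i]
-- 		elif c == minimum:
-- 			minimal_implicants.append(i)
-- 	return minimal_implicants
-- ===== Notes on version B (the rewrite author's own statement) =====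
-- stated objective: simpler
-- what changed: Replaces A's two full passes (calling counter up to three times per element) with a single pass keeping the running minimum and the current list of minimal implicants.
import Mathlib
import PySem

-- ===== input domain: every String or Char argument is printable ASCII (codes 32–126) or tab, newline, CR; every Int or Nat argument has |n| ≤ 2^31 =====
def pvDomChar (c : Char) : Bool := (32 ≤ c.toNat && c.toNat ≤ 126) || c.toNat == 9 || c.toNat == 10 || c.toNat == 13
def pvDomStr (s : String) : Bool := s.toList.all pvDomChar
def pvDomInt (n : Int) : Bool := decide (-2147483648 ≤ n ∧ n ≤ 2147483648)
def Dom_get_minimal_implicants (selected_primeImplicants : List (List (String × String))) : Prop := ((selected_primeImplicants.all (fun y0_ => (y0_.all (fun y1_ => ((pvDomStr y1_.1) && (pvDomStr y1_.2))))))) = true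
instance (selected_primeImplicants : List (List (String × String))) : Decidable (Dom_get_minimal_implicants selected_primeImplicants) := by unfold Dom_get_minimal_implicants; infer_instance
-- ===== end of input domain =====

-- B replaces A's two passes (up to three counter calls per element) with one pass that keeps the
-- running minimum and the current minimal list (simpler decomposition); same return value everywhere.

-- ===== PORT A =====
-- shared helper `counter` (both Pythons define it identically)
def counter (l : List (String × String)) : Int :=
  (l.map Prod.fst).foldl
    (fun count s => s.toList.foldl (fun c i => if i = '0' ∨ i = '1' then c + 1 else c) count) 0

def get_minimal_implicants (selected_primeImplicants : List (List (String × String))) : List (List (String × String)) :=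
  let minimum : Int :=
    selected_primeImplicants.foldl (fun m i => if counter i < m then counter i else m) 999999
  selected_primeImplicants.foldl
    (fun acc i => if counter i = minimum then acc ++ [i] else acc) []

-- ===== PORT B =====
def altStep (st : Int × List (List (String × String))) (i : List (String × String)) :
    Int × List (List (String × String)) :=
  let c := counter i
  if c < st.1 then (c, [i])
  else if c = st.1 then (st.1, st.2 ++ [i])
  else st

def get_minimal_implicants_alt (selected_primeImplicants : List (List (String × String))) : List (List (String × String)) :=
  (selected_primeImplicants.foldl altStep (999999, [])).2

-- ===== PRECONDITION & SPEC =====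
def Spec_get_minimal_implicants (selected_primeImplicants : List (List (String × String))) (out : List (List (String × String))) : Prop := out = get_minimal_implicants_alt selected_primeImplicants
instance (selected_primeImplicants : List (List (String × String))) (out : List (List (String × String))) : Decidable (Spec_get_minimal_implicants selected_primeImplicants out) := by unfold Spec_get_minimal_implicants; infer_instance

-- ===== CLAIM (what is proved, stated in full; the proofs are below) =====
def Claim_equal_get_minimal_implicants : Prop := ∀ (selected_primeImplicants : List (List (String × String))), Dom_get_minimal_implicants selected_primeImplicants → Spec_get_minimal_implicants selected_primeImplicants (get_minimal_implicants selected_primeImplicants)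

-- ===== LEMMAS AND PROOFS =====

-- running minimum of A's first loop
def fmin (xs : List (List (String × String))) (m : Int) : Int :=
  xs.foldl (fun m i => if counter i < m then counter i else m) m

lemma fmin_le (xs : List (List (String × String))) (m : Int) : fmin xs m ≤ m := by
  induction xs generalizing m with
  | nil => simp [fmin]
  | cons x t ih =>
    simp only [fmin, List.foldl_cons]
    split
    · exact le_trans (ih _) (le_of_lt (by assumption))
    · exact ih m

-- A's second loop is a filter by the final minimum
lemma second_pass_filter (m : Int) (xs : List (List (String × String)))
    (acc : List (List (String × String))) :
    xs.foldl (fun acc i => if counter i = m then acc ++ [i] else acc) acc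
      = acc ++ xs.filter (fun x => counter x = m) := by
  induction xs generalizing acc with
  | nil => simp
  | cons x t ih =>
    simp only [List.foldl_cons, List.filter_cons]
    by_cases h : counter x = m
    · simp [h, ih, List.append_assoc]
    · simp [h, ih]

-- B's single pass: invariant relating its state to the final minimum and the filter
lemma alt_inv (xs : List (List (String × String))) (m : Int)
    (acc : List (List (String × String))) :
    xs.foldl altStep (m, acc)
      = (fmin xs m,
         (if fmin xs m = m then acc else []) ++ xs.filter (fun x => counter x = fmin xs m)) := by
  induction xs generalizing m acc with
  | nil => simp [fmin]
  | cons x t ih =>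
    rcases lt_trichotomy (counter x) m with hlt | heq | hgt
    · have hm : fmin (x :: t) m = fmin t (counter x) := by
        unfold fmin; rw [List.foldl_cons, if_pos hlt]
      have hle := fmin_le t (counter x)
      rw [List.foldl_cons, show altStep (m, acc) x = (counter x, [x]) by simp [altStep, hlt],
          ih, hm, List.filter_cons]
      rw [if_neg (show fmin t (counter x) ≠ m by omega)]
      by_cases hx : counter x = fmin t (counter x)
      · rw [if_pos hx.symm, if_pos (decide_eq_true hx)]
        rfl
      · rw [if_neg (fun h => hx h.symm),
            if_neg (fun h => hx (of_decide_eq_true h))]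
    · have hm : fmin (x :: t) m = fmin t m := by
        unfold fmin; rw [List.foldl_cons, if_neg (by omega)]
      rw [List.foldl_cons, show altStep (m, acc) x = (m, acc ++ [x]) by simp [altStep, heq],
          ih, hm, List.filter_cons]
      by_cases hfm : fmin t m = m
      · rw [if_pos hfm, if_pos hfm]
        have hx : counter x = fmin t m := by omega
        simp [hx]
      · rw [if_neg hfm, if_neg hfm]
        have hx : ¬ counter x = fmin t m := by omega
        simp [hx]
    · have hnlt : ¬ counter x < m := by omega
      have hne : counter x ≠ m := by omega
      have hm : fmin (x :: t) m = fmin t m := by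
        unfold fmin; rw [List.foldl_cons, if_neg hnlt]
      have hle := fmin_le t m
      rw [List.foldl_cons, show altStep (m, acc) x = (m, acc) by simp [altStep, hnlt, hne],
          ih, hm, List.filter_cons]
      have hx : ¬ counter x = fmin t m := by omega
      simp [hx]

-- ===== VERDICT (by name: the statement is the Claim_ definition above) =====
theorem get_minimal_implicants_spec : Claim_equal_get_minimal_implicants := by
  intro xs _
  show get_minimal_implicants xs = get_minimal_implicants_alt xs
  unfold get_minimal_implicants get_minimal_implicants_alt
  rw [alt_inv, second_pass_filter, fmin]
  split <;> rfl
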